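-- pv_equiv track=rewrite | github.com/MuhammadZahidRWTH/DataScience-Projects | NLP/Document_Extractor/document_extractor.py | filter_fields_by_type
-- ===== SOURCE A (Python) =====
-- def filter_fields_by_type(fields, doc_type):
--     """
--     Filters the fields to include only general fields and those specific to the document type,
--     while excluding fields with null or empty values.
--
--     Args:
--         fields (dict): The extracted fields from the document.
--         doc_type (str): The type of document (e.g., "investment", "personal_account").
--
--     Returns:
--         dict: The filtered fields.
--     """
--
--     def is_valid(value):
--         """Check if the field value is not null, empty, or just whitespace."""
--         return value not in [None, "", " "]
--
--     # General fields that are always included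
--     general_fields = ["document_id", "document_type", "document_date", "customer_name", "customer_id",
--                       "institution_name", "institution_address", "language"]
--
--     # Document type specific fields (based on the document type detected)
--     document_type_fields = {
--         "investment": ["portfolio_id", "portfolio_value", "asset_number", "risk_profile"],
--         "personal_account": [
--             "account_number", "account_type", "statement_period", "opening_balance",
--             "closing_balance", "available_balance", "transaction_number"
--         ],
--         "garnishment": [
--             "debtor_name", "creditor_name", "garnishment_amount", "effective_date",
--             "duration", "legal_authority"
--         ],
--         "credit": [
--             "card_number", "credit_limit", "interest_rate", "payment_due_date",
--             "statement_period", "minimum_payment", "previous_balance", "new_balance"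
--         ]
--         # Add other types if needed
--     }
--
--     # Start with general fields
--     filtered_fields = {key: value for key, value in fields.items() if key in general_fields and is_valid(value)}
--
--     # Add document type specific fields if they exist
--     if doc_type in document_type_fields:
--         for field in document_type_fields[doc_type]:
--             if field in fields and is_valid(fields[field]):
--                 filtered_fields[field] = fields[field]
--
--     return filtered_fields
-- ===== SOURCE B (Python) =====
-- GENERAL_FIELDS = frozenset([
--     "document_id", "document_type", "document_date", "customer_name", "customer_id",
--     "institution_name", "institution_address", "language",
-- ])
--
-- DOCUMENT_TYPE_FIELDS = {
--     "investment": ["portfolio_id", "portfolio_value", "asset_number", "risk_profile"],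
--     "personal_account": [
--         "account_number", "account_type", "statement_period", "opening_balance",
--         "closing_balance", "available_balance", "transaction_number"
--     ],
--     "garnishment": [
--         "debtor_name", "creditor_name", "garnishment_amount", "effective_date",
--         "duration", "legal_authority"
--     ],
--     "credit": [
--         "card_number", "credit_limit", "interest_rate", "payment_due_date",
--         "statement_period", "minimum_payment", "previous_balance", "new_balance"
--     ],
-- }
--
--
-- def filter_fields_by_type(fields, doc_type):
--     """Single pass over fields: partition hits into the general part (kept in
--     fields order) and the type-specific hits (re-emitted in the specific list's
--     order), with no lookups back into fields."""
--
--     def is_valid(value):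
--         return value not in (None, "", " ")
--
--     specific = DOCUMENT_TYPE_FIELDS.get(doc_type, [])
--     general_part = []
--     specific_hits = {}
--     for key, value in fields.items():
--         if not is_valid(value):
--             continue
--         if key in GENERAL_FIELDS:
--             general_part.append((key, value))
--         elif key in specific:
--             specific_hits[key] = value
--     # keys of the two parts are disjoint and individually unique, so dict()
--     # is plain construction from the pairs
--     return dict(general_part + [(f, specific_hits[f]) for f in specific if f in specific_hits])
-- ===== Notes on version B (the rewrite author's own statement) =====
-- stated objective: alternative
-- what changed: A filters the dict for general fields and then loops over the type-specific field list with lookups back into fields; B makes one pass over fields that partitions valid entries into the general part and a dict of specific hits, then emits the hits in the specific list's order, with no lookups back into fields.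
import Mathlib
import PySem

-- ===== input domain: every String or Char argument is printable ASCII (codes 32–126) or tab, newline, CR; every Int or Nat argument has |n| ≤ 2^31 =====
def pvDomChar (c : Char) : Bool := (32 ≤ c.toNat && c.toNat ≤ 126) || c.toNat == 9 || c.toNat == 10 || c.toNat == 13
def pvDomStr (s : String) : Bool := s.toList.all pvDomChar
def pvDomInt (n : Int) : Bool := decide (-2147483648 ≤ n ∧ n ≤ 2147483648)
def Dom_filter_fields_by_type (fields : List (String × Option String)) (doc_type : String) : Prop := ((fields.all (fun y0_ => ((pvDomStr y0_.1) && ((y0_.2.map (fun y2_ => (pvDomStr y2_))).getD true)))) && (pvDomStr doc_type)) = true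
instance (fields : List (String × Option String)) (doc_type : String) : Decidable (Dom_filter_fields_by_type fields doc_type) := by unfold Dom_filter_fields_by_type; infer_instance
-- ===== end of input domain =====

-- B replaces A's two passes (dict comprehension + a loop over the specific list with
-- lookups back into fields) by one partitioning pass over fields followed by re-emitting
-- the specific hits in list order; same output, alternative decomposition.


-- shared literals of both Pythons (identical text in Source A and Source B)
def pvGeneralFields : List String :=
  ["document_id", "document_type", "document_date", "customer_name", "customer_id",
   "institution_name", "institution_address", "language"]

def pvDocTypeFields : PySem.Dict String (List String) :=
  PySem.Dict.ofList
    [("investment", ["portfolio_id", "portfolio_value", "asset_number", "risk_profile"]),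
     ("personal_account", ["account_number", "account_type", "statement_period", "opening_balance",
        "closing_balance", "available_balance", "transaction_number"]),
     ("garnishment", ["debtor_name", "creditor_name", "garnishment_amount", "effective_date",
        "duration", "legal_authority"]),
     ("credit", ["card_number", "credit_limit", "interest_rate", "payment_due_date",
        "statement_period", "minimum_payment", "previous_balance", "new_balance"])]

-- is_valid(value): value not in [None, "", " "]
def pvIsValid (v : Option String) : Bool := !(v == none || v == some "" || v == some " ")

-- ===== PORT A =====
def filter_fields_by_type (fields : List (String × Option String)) (doc_type : String) : List (String × Option String) :=
  let filtered_fields : PySem.Dict String (Option String) :=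
    PySem.Dict.mk (fields.filter (fun kv => pvGeneralFields.contains kv.1 && pvIsValid kv.2))
  let result : PySem.Dict String (Option String) :=
    match PySem.Dict.get? pvDocTypeFields doc_type with
    | some specific =>
        specific.foldl (fun acc f =>
          match PySem.Dict.get? (PySem.Dict.mk fields) f with
          | some v => if pvIsValid v then acc.insert f v else acc
          | none => acc) filtered_fields
    | none => filtered_fields
  result.items

-- ===== PORT B =====
def filter_fields_by_type_alt (fields : List (String × Option String)) (doc_type : String) : List (String × Option String) :=
  let specific : List String := (PySem.Dict.get? pvDocTypeFields doc_type).getD []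
  let acc : List (String × Option String) × PySem.Dict String (Option String) :=
    fields.foldl (fun acc kv =>
      if !pvIsValid kv.2 then acc
      else if pvGeneralFields.contains kv.1 then (acc.1 ++ [kv], acc.2)
      else if specific.contains kv.1 then (acc.1, acc.2.insert kv.1 kv.2)
      else acc)
    ([], PySem.Dict.empty)
  -- dict(general_part + [(f, specific_hits[f]) for f in specific if f in specific_hits]):
  -- the keys of the concatenated pair list are distinct, so dict() is plain construction
  -- from the pairs and the result dict IS this association list.
  acc.1 ++ specific.filterMap (fun f => (PySem.Dict.get? acc.2 f).map (fun v => (f, v)))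

-- ===== PRECONDITION & SPEC =====
-- Pre_ excludes association lists with duplicate keys: they do not correspond to any
-- Python dict `fields` (a dict's keys are distinct), so first-match/overwrite behaviour
-- of the ports there is accidental representation detail.
def Pre_filter_fields_by_type (fields : List (String × Option String)) (doc_type : String) : Prop :=
  (fields.map Prod.fst).Nodup
instance (fields : List (String × Option String)) (doc_type : String) : Decidable (Pre_filter_fields_by_type fields doc_type) := by unfold Pre_filter_fields_by_type; infer_instance

def pvWitness_filter_fields_by_type : (List (String × Option String)) × String :=
  ([("document_id", some "7"), ("card_number", some "1234"), ("junk", some "x"), ("language", none)], "credit")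

def Spec_filter_fields_by_type (fields : List (String × Option String)) (doc_type : String) (out : List (String × Option String)) : Prop := out = filter_fields_by_type_alt fields doc_type
instance (fields : List (String × Option String)) (doc_type : String) (out : List (String × Option String)) : Decidable (Spec_filter_fields_by_type fields doc_type out) := by unfold Spec_filter_fields_by_type; infer_instance

-- ===== CLAIM (what is proved, stated in full; the proofs are below) =====
def Claim_equal_filter_fields_by_type : Prop := ∀ (fields : List (String × Option String)) (doc_type : String), Dom_filter_fields_by_type fields doc_type → Pre_filter_fields_by_type fields doc_type → Spec_filter_fields_by_type fields doc_type (filter_fields_by_type fields doc_type)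

-- ===== LEMMAS AND PROOFS =====

-- A's specific-field loop over a duplicate-free list of fresh keys appends, per field,
-- exactly the valid looked-up pair.
theorem pvA_fold (fields : List (String × Option String)) (S : List String)
    (acc : PySem.Dict String (Option String))
    (hS : S.Nodup) (hfresh : ∀ f ∈ S, acc.contains f = false) :
    (S.foldl (fun acc f =>
        match PySem.Dict.get? (PySem.Dict.mk fields) f with
        | some v => if pvIsValid v then acc.insert f v else acc
        | none => acc) acc).items
      = acc.items ++ S.filterMap (fun f =>
          ((PySem.Dict.mk fields).get? f).bind (fun v => if pvIsValid v then some (f, v) else none)) := by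
  induction S generalizing acc with
  | nil => simp
  | cons f S ih =>
    obtain ⟨hf, hS2⟩ := List.nodup_cons.mp hS
    have hfr := hfresh f (by simp)
    have hfresh2 : ∀ g ∈ S, acc.contains g = false :=
      fun g hg => hfresh g (List.mem_cons_of_mem _ hg)
    simp only [List.foldl_cons, List.filterMap_cons]
    cases hget : PySem.Dict.get? (PySem.Dict.mk fields) f with
    | none =>
      rw [ih _ hS2 hfresh2]
      rfl
    | some v =>
      simp only [Option.bind_some]
      by_cases hv : pvIsValid v = true
      · have hrest : ∀ g ∈ S, (acc.insert f v).contains g = false := by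
          intro g hg
          rw [PySem.Dict.contains_insert]
          have hne : g ≠ f := fun h => hf (h ▸ hg)
          simp [hne, hfresh2 g hg]
        rw [if_pos hv, if_pos hv, ih _ hS2 hrest,
            PySem.Dict.items_insert_of_not_contains _ _ hfr]
        simp
      · rw [if_neg hv, if_neg hv, ih _ hS2 hfresh2]

-- first component of B's partitioning fold
theorem pvB_fold_fst (specific : List String) (l : List (String × Option String))
    (gp : List (String × Option String)) (h : PySem.Dict String (Option String)) :
    (l.foldl (fun acc kv =>
      if !pvIsValid kv.2 then acc
      else if pvGeneralFields.contains kv.1 then (acc.1 ++ [kv], acc.2)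
      else if specific.contains kv.1 then (acc.1, acc.2.insert kv.1 kv.2)
      else acc) (gp, h)).1
    = gp ++ l.filter (fun kv => pvIsValid kv.2 && pvGeneralFields.contains kv.1) := by
  induction l generalizing gp h with
  | nil => simp
  | cons kv l ih =>
    simp only [List.foldl_cons, List.filter_cons]
    by_cases hv : pvIsValid kv.2 = true
    · by_cases hg : kv.1 ∈ pvGeneralFields
      · rw [if_neg (by simp [hv]), if_pos (by simpa using hg), ih]
        simp [hv, hg]
      · by_cases hs : kv.1 ∈ specific
        · rw [if_neg (by simp [hv]), if_neg (by simpa using hg), if_pos (by simpa using hs), ih]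
          simp [hv, hg]
        · rw [if_neg (by simp [hv]), if_neg (by simpa using hg), if_neg (by simpa using hs), ih]
          simp [hv, hg]
    · rw [if_pos (by simp [hv]), ih]
      simp [hv]

-- second component of B's partitioning fold
theorem pvB_fold_snd (specific : List String) (l : List (String × Option String))
    (gp : List (String × Option String)) (h : PySem.Dict String (Option String)) :
    (l.foldl (fun acc kv =>
      if !pvIsValid kv.2 then acc
      else if pvGeneralFields.contains kv.1 then (acc.1 ++ [kv], acc.2)
      else if specific.contains kv.1 then (acc.1, acc.2.insert kv.1 kv.2)
      else acc) (gp, h)).2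
    = (l.filter (fun kv => pvIsValid kv.2 && !pvGeneralFields.contains kv.1 && specific.contains kv.1)).foldl
        (fun d kv => d.insert kv.1 kv.2) h := by
  induction l generalizing gp h with
  | nil => simp
  | cons kv l ih =>
    simp only [List.foldl_cons, List.filter_cons]
    by_cases hv : pvIsValid kv.2 = true
    · by_cases hg : kv.1 ∈ pvGeneralFields
      · rw [if_neg (by simp [hv]), if_pos (by simpa using hg), ih]
        simp [hv, hg]
      · by_cases hs : kv.1 ∈ specific
        · rw [if_neg (by simp [hv]), if_neg (by simpa using hg), if_pos (by simpa using hs), ih]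
          simp [hv, hg, hs]
        · rw [if_neg (by simp [hv]), if_neg (by simpa using hg), if_neg (by simpa using hs), ih]
          simp [hv, hg, hs]
    · rw [if_pos (by simp [hv]), ih]
      simp [hv]

-- lookup in the dict of a key-filtered duplicate-free association list
theorem pvGet_mk_filter (l : List (String × Option String)) (p : String × Option String → Bool)
    (hnd : (l.map Prod.fst).Nodup) (k : String) :
    (PySem.Dict.mk (l.filter p)).get? k
      = ((PySem.Dict.mk l).get? k).bind (fun v => if p (k, v) then some v else none) := by
  induction l with
  | nil => rfl
  | cons a l ih =>
    simp only [List.map_cons, List.nodup_cons] at hnd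
    obtain ⟨ha, hnd2⟩ := hnd
    rw [List.filter_cons]
    by_cases hp : p a = true
    · rw [if_pos hp, PySem.Dict.get?_mk_cons, PySem.Dict.get?_mk_cons]
      by_cases hk : a.1 == k
      · have hak : a.1 = k := by simpa using hk
        subst hak
        simp [hp]
      · simp only [hk, Bool.false_eq_true, if_false]
        exact ih hnd2
    · rw [if_neg hp, PySem.Dict.get?_mk_cons]
      by_cases hk : a.1 == k
      · have hak : a.1 = k := by simpa using hk
        have hnone : (PySem.Dict.mk (l.filter p)).get? k = none := by
          apply (PySem.Dict.get?_eq_none_iff_not_mem_keys _ _).mpr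
          intro hmem
          apply ha
          rw [← hak] at hmem
          simp only [PySem.Dict.keys_mk] at hmem
          obtain ⟨kv, hkv, hfst⟩ := List.mem_map.mp hmem
          exact List.mem_map.mpr ⟨kv, List.mem_of_mem_filter hkv, hfst⟩
        rw [hnone]
        have hpf : p (k, a.2) = false := by
          rw [← hak]
          simpa using hp
        simp [hk, hpf]
      · simp only [hk, Bool.false_eq_true, if_false]
        exact ih hnd2

-- the specific lists stored in the table are duplicate-free and disjoint from the general fields
theorem pvTable_ok (dt : String) :
    ((PySem.Dict.get? pvDocTypeFields dt).getD []).Nodup ∧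
    ∀ f ∈ (PySem.Dict.get? pvDocTypeFields dt).getD [], pvGeneralFields.contains f = false := by
  have h : pvDocTypeFields = PySem.Dict.mk
    [("investment", ["portfolio_id", "portfolio_value", "asset_number", "risk_profile"]),
     ("personal_account", ["account_number", "account_type", "statement_period", "opening_balance",
        "closing_balance", "available_balance", "transaction_number"]),
     ("garnishment", ["debtor_name", "creditor_name", "garnishment_amount", "effective_date",
        "duration", "legal_authority"]),
     ("credit", ["card_number", "credit_limit", "interest_rate", "payment_due_date",
        "statement_period", "minimum_payment", "previous_balance", "new_balance"])] := by rfl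
  rw [h]
  simp only [PySem.Dict.get?_mk_cons]
  have h0 : (PySem.Dict.mk ([] : List (String × List String))).get? dt = none := rfl
  split_ifs <;> first | decide | (rw [h0]; exact ⟨List.nodup_nil, by intro f hf; simp at hf⟩)

-- ===== VERDICT (by name: the statement is the Claim_ definition above) =====
theorem filter_fields_by_type_spec : Claim_equal_filter_fields_by_type := by
  intro fields dt _hdom hpre
  unfold Pre_filter_fields_by_type at hpre
  unfold Spec_filter_fields_by_type
  obtain ⟨hSnd, hdisj⟩ := pvTable_ok dt
  show filter_fields_by_type fields dt = filter_fields_by_type_alt fields dt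
  simp only [filter_fields_by_type, filter_fields_by_type_alt]
  rw [pvB_fold_fst, pvB_fold_snd]
  have hq : fields.filter (fun kv => pvGeneralFields.contains kv.1 && pvIsValid kv.2)
      = fields.filter (fun kv => pvIsValid kv.2 && pvGeneralFields.contains kv.1) :=
    List.filter_congr (fun kv _ => Bool.and_comm _ _)
  cases hget : PySem.Dict.get? pvDocTypeFields dt with
  | none =>
    simp only [Option.getD_none, List.filterMap_nil, List.append_nil]
    exact hq
  | some S =>
    rw [hget] at hSnd hdisj
    simp only [Option.getD_some] at hSnd hdisj
    simp only [Option.getD_some]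
    -- freshness of the specific keys w.r.t. the general-field dict
    have hfreshA : ∀ f ∈ S,
        (PySem.Dict.mk (fields.filter (fun kv => pvGeneralFields.contains kv.1 && pvIsValid kv.2))).contains f = false := by
      intro f hf
      have hG := hdisj f hf
      rw [PySem.Dict.contains_eq_decide_mem_keys]
      simp only [PySem.Dict.keys_mk, decide_eq_false_iff_not]
      intro hmem
      obtain ⟨kv, hkv, hfst⟩ := List.mem_map.mp hmem
      have hqkv := (List.mem_filter.mp hkv).2
      rw [hfst] at hqkv
      simp only [Bool.and_eq_true] at hqkv
      rw [hqkv.1] at hG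
      exact Bool.true_eq_false.mp hG
    rw [pvA_fold fields S _ hSnd hfreshA]
    -- the hits dict is the dict of the pB-filtered fields
    have hkeys : ((fields.filter (fun kv => pvIsValid kv.2 && !pvGeneralFields.contains kv.1 && S.contains kv.1)).map Prod.fst).Nodup :=
      (List.filter_sublist.map Prod.fst).nodup hpre
    have hitems := PySem.Dict.items_foldl_insert_fresh
      (l := fields.filter (fun kv => pvIsValid kv.2 && !pvGeneralFields.contains kv.1 && S.contains kv.1))
      (k := Prod.fst) (v := Prod.snd) (d := PySem.Dict.empty)
      (fun a _ => PySem.Dict.contains_empty _) hkeys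
    have hdict : ((fields.filter (fun kv => pvIsValid kv.2 && !pvGeneralFields.contains kv.1 && S.contains kv.1)).foldl
          (fun d kv => d.insert kv.1 kv.2) PySem.Dict.empty)
        = PySem.Dict.mk (fields.filter (fun kv => pvIsValid kv.2 && !pvGeneralFields.contains kv.1 && S.contains kv.1)) := by
      apply PySem.Dict.ext
      rw [hitems]
      simp [PySem.Dict.empty]
    rw [hdict]
    -- the two tails agree field by field
    have hmap : S.filterMap (fun f =>
          ((PySem.Dict.mk (fields.filter (fun kv => pvIsValid kv.2 && !pvGeneralFields.contains kv.1 && S.contains kv.1))).get? f).map (fun v => (f, v)))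
        = S.filterMap (fun f =>
          ((PySem.Dict.mk fields).get? f).bind (fun v => if pvIsValid v then some (f, v) else none)) := by
      apply List.filterMap_congr
      intro f hf
      rw [pvGet_mk_filter fields _ hpre f]
      have hG := hdisj f hf
      have hSin : S.contains f = true := by
        simpa using hf
      cases (PySem.Dict.mk fields).get? f with
      | none => rfl
      | some v =>
        by_cases hv : pvIsValid v = true
        · simp [hv]
          exact ⟨by simpa using hG, hf⟩
        · simp [hv]
    rw [hmap, hq]
    rfl
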